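-- pv_equiv track=rewrite | github.com/leandr92/1cai-public | 1c_mcp_code_generation/src/py_server/code_generation/templates/processor.py | _apply_code_formatting
-- ===== SOURCE A (Python) =====
-- def _apply_code_formatting(code: str) -> str:
--     """Применяет форматирование к коду."""
--     # Убираем лишние переносы строк
--     lines = code.split('\n')
--     formatted_lines = []
--     prev_empty = False
--
--     for line in lines:
--         # Убираем trailing spaces
--         line = line.rstrip()
--
--         # Убираем множественные пустые строки
--         if line.strip() == '':
--             if not prev_empty:
--                 formatted_lines.append('')
--             prev_empty = True
--         else:
--             formatted_lines.append(line)
--             prev_empty = False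
--
--     return '\n'.join(formatted_lines)
-- ===== SOURCE B (Python) =====
-- def _apply_code_formatting(code: str) -> str:
--     """Strip trailing whitespace per line; partition the cleaned lines into runs
--     of equal blankness, then emit one '' per blank run and every line of each
--     non-blank run (groupby-style, no per-line state flag)."""
--     cleaned = [line.rstrip() for line in code.split('\n')]
--     runs = []
--     for line in cleaned:
--         if runs and (runs[-1][0] == '') == (line == ''):
--             runs[-1].append(line)
--         else:
--             runs.append([line])
--     out = []
--     for run in runs:
--         if run[0] == '':
--             out.append('')
--         else:
--             out.extend(run)
--     return '\n'.join(out)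
-- ===== Notes on version B (the rewrite author's own statement) =====
-- stated objective: alternative
-- what changed: Replaces A's single stateful prev_empty-flag loop by a groupby-style two-stage pipeline: first partition the rstripped lines into maximal runs of equal blankness, then emit one empty line per blank run and all lines of each non-blank run.
import Mathlib
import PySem

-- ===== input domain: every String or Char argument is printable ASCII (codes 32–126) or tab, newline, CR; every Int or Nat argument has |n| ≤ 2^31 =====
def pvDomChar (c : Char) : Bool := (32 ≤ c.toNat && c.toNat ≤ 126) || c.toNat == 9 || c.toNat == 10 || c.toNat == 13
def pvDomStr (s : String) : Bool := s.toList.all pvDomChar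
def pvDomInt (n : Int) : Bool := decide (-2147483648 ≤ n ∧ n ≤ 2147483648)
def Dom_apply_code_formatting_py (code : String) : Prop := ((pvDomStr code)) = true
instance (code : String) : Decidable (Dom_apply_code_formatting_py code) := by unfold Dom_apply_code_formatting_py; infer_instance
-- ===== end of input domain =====

-- B replaces A's stateful prev_empty-flag loop by a groupby-style two-stage pipeline:
-- partition the rstripped lines into maximal runs of equal blankness, then emit one ''
-- per blank run and all lines of each non-blank run (objective: alternative).

-- ===== PORT A =====
-- the body of A's for-loop: rstrip the line, then append/update prev_empty
def stepA (st : List String × Bool) (line : String) : List String × Bool :=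
  let line := PySem.Str.rstrip line
  if PySem.Str.strip line == "" then
    if !st.2 then (st.1 ++ [""], true) else (st.1, true)
  else (st.1 ++ [line], false)

def apply_code_formatting_py (code : String) : String :=
  let lines := (PySem.Str.split? code "\n").getD []   -- sep ≠ "", split? is always some
  let st := lines.foldl stepA ([], false)
  PySem.Str.join "\n" st.1

-- ===== PORT B =====
-- first loop of B: 'runs[-1].append(line)' (in-place append to the last run) is
-- dropLast ++ [last ++ [line]]; runs[-1] / run[0] are pyGet? at -1 / 0 (never none here)
def buildStep (runs : List (List String)) (line : String) : List (List String) :=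
  match PySem.List.pyGet? runs (-1) with
  | some last =>
      if ((PySem.List.pyGet? last 0 == some "") == (line == "")) then
        runs.dropLast ++ [last ++ [line]]
      else runs ++ [[line]]
  | none => runs ++ [[line]]

-- second loop of B: out.append('') for a blank run, out.extend(run) otherwise
def emitStep (out : List String) (run : List String) : List String :=
  if PySem.List.pyGet? run 0 == some "" then out ++ [""] else out ++ run

def apply_code_formatting_py_alt (code : String) : String :=
  let cleaned := ((PySem.Str.split? code "\n").getD []).map PySem.Str.rstrip
  let runs := cleaned.foldl buildStep []
  let out := runs.foldl emitStep []
  PySem.Str.join "\n" out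

-- ===== PRECONDITION & SPEC =====
def Spec_apply_code_formatting_py (code : String) (out : String) : Prop := out = apply_code_formatting_py_alt code
instance (code : String) (out : String) : Decidable (Spec_apply_code_formatting_py code out) := by unfold Spec_apply_code_formatting_py; infer_instance

-- ===== CLAIM (what is proved, stated in full; the proofs are below) =====
def Claim_equal_apply_code_formatting_py : Prop := ∀ (code : String), Dom_apply_code_formatting_py code → Spec_apply_code_formatting_py code (apply_code_formatting_py code)

-- ===== LEMMAS AND PROOFS =====

-- the kept lines of a cleaned tail, given whether the scan already saw a blank line
def keptFrom : List String → Bool → List String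
  | [], _ => []
  | l :: ls, prev =>
    if l == "" then (if prev then keptFrom ls true else "" :: keptFrom ls true)
    else l :: keptFrom ls false

-- the emitted lines of one run
def emitRun (run : List String) : List String :=
  if PySem.List.pyGet? run 0 == some "" then [""] else run

lemma forall_of_forall_dropWhile {α : Type} (p : α → Bool) (l : List α)
    (h : ∀ x ∈ l.dropWhile p, p x = true) : ∀ x ∈ l, p x = true := by
  induction l with
  | nil => simp
  | cons a t ih =>
    by_cases hp : p a = true
    · simp only [List.dropWhile_cons, hp, if_true] at h
      intro x hx
      rcases List.mem_cons.1 hx with rfl | hx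
      · exact hp
      · exact ih h x hx
    · simp only [List.dropWhile_cons, hp] at h
      exact h

lemma rstrip_eq_nil_iff (cs : List Char) :
    PySem.Chars.rstrip cs = [] ↔ ∀ c ∈ cs, PySem.Chars.isspace c = true := by
  simp [PySem.Chars.rstrip, List.dropWhile_eq_nil_iff]

lemma strip_eq_nil_iff (cs : List Char) :
    PySem.Chars.strip cs = [] ↔ ∀ c ∈ cs, PySem.Chars.isspace c = true := by
  rw [PySem.Chars.strip, rstrip_eq_nil_iff]
  constructor
  · exact fun h => forall_of_forall_dropWhile _ cs h
  · intro h c hc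
    exact h c ((List.dropWhile_sublist _).subset hc)

lemma forall_rstrip_iff (cs : List Char) :
    (∀ c ∈ PySem.Chars.rstrip cs, PySem.Chars.isspace c = true) ↔
    (∀ c ∈ cs, PySem.Chars.isspace c = true) := by
  constructor
  · intro h c hc
    have : c ∈ cs.reverse := by simpa using hc
    rw [← List.takeWhile_append_dropWhile (p := PySem.Chars.isspace) (l := cs.reverse)] at this
    rcases List.mem_append.1 this with h1 | h2
    · exact List.mem_takeWhile_imp h1
    · exact h c (by simpa [PySem.Chars.rstrip] using h2)
  · intro h c hc
    have : c ∈ cs := by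
      have := (List.dropWhile_sublist (p := PySem.Chars.isspace) (l := cs.reverse)).subset
        (by simpa [PySem.Chars.rstrip] using hc)
      simpa using this
    exact h c this

lemma cond_eq (s : String) :
    (PySem.Str.strip (PySem.Str.rstrip s) == "") = (PySem.Str.rstrip s == "") := by
  have hs : ∀ t : String, (t == "") = decide (t.toList = []) := by
    intro t
    by_cases h : t = "" <;> simp [h, String.toList_eq_nil_iff]
  rw [hs, hs]
  have h1 : (PySem.Str.strip (PySem.Str.rstrip s)).toList
      = PySem.Chars.strip (PySem.Chars.rstrip s.toList) := by
    rw [PySem.Str.toList_strip, PySem.Str.toList_rstrip]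
  have h2 : (PySem.Str.rstrip s).toList = PySem.Chars.rstrip s.toList :=
    PySem.Str.toList_rstrip s
  simp only [h1, h2]
  have : PySem.Chars.strip (PySem.Chars.rstrip s.toList) = [] ↔
      PySem.Chars.rstrip s.toList = [] := by
    rw [strip_eq_nil_iff, forall_rstrip_iff, rstrip_eq_nil_iff]
  simp [this]

-- A's loop computes keptFrom of the cleaned lines
lemma loopA_eq (lines : List String) : ∀ (acc : List String) (prev : Bool),
    (lines.foldl stepA (acc, prev)).1
    = acc ++ keptFrom (lines.map PySem.Str.rstrip) prev := by
  induction lines with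
  | nil => intro acc prev; simp [keptFrom]
  | cons l ls ih =>
    intro acc prev
    rw [List.foldl_cons, List.map_cons]
    by_cases hb : (PySem.Str.rstrip l == "") = true
    · have hbe : PySem.Str.rstrip l = "" := by simpa using hb
      cases prev with
      | false =>
        have hst : stepA (acc, false) l = (acc ++ [""], true) := by
          simp [stepA, cond_eq, hb]
        rw [hst, ih]
        simp [keptFrom, hbe]
      | true =>
        have hst : stepA (acc, true) l = (acc, true) := by
          simp [stepA, cond_eq, hb]
        rw [hst, ih]
        simp [keptFrom, hbe]
    · rw [Bool.not_eq_true] at hb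
      have hst : stepA (acc, prev) l = (acc ++ [PySem.Str.rstrip l], false) := by
        simp [stepA, cond_eq, hb]
      rw [hst, ih]
      simp [keptFrom, hb]

lemma emitStep_eq (out run : List String) : emitStep out run = out ++ emitRun run := by
  simp only [emitStep, emitRun]
  split_ifs <;> rfl

lemma emit_eq_flatMap (runs : List (List String)) :
    runs.foldl emitStep [] = runs.flatMap emitRun := by
  have hf : emitStep = fun out run => out ++ emitRun run := by
    funext out run; exact emitStep_eq out run
  rw [hf, PySem.List.foldl_append_eq_flatMap]
  simp

lemma keptFrom_blank_true (ls : List String) : keptFrom ("" :: ls) true = keptFrom ls true := by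
  simp [keptFrom]

lemma keptFrom_blank_false (ls : List String) :
    keptFrom ("" :: ls) false = "" :: keptFrom ls true := by
  simp [keptFrom]

lemma keptFrom_nonblank (l : String) (ls : List String) (prev : Bool) (hl : l ≠ "") :
    keptFrom (l :: ls) prev = l :: keptFrom ls false := by
  simp [keptFrom, hl]

-- B's run-building then emission computes keptFrom of the remaining lines
lemma build_emit_aux (ls : List String) : ∀ (rs : List (List String)) (r : List String),
    r ≠ [] →
    ((ls.foldl buildStep (rs ++ [r])).flatMap emitRun)
      = (rs ++ [r]).flatMap emitRun ++ keptFrom ls (PySem.List.pyGet? r 0 == some "") := by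
  induction ls with
  | nil => intro rs r _; simp [keptFrom]
  | cons l ls ih =>
    intro rs r hr
    have hlast : PySem.List.pyGet? (rs ++ [r]) (-1) = some r :=
      PySem.List.pyGet?_neg_one_append_singleton rs r
    have hdrop : (rs ++ [r]).dropLast = rs := by simp
    by_cases hsame : (PySem.List.pyGet? r 0 == some "") = (l == "")
    · have hstep : buildStep (rs ++ [r]) l = rs ++ [r ++ [l]] := by
        simp [buildStep, hlast, hsame, hdrop]
      have hhd : PySem.List.pyGet? (r ++ [l]) 0 = PySem.List.pyGet? r 0 := by
        cases r with
        | nil => exact absurd rfl hr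
        | cons a t => simp
      rw [List.foldl_cons, hstep, ih rs (r ++ [l]) (by simp), hhd]
      by_cases hl : l = ""
      · subst hl
        have hblank : (PySem.List.pyGet? r 0 == some "") = true := by
          rw [hsame]; rfl
        have hA : emitRun (r ++ [""]) = [""] := by
          simp only [emitRun, hhd, hblank, if_true]
        have hB : emitRun r = [""] := by
          simp only [emitRun, hblank, if_true]
        rw [hblank, keptFrom_blank_true]
        simp [List.flatMap_append, hA, hB]
      · have hnb : (PySem.List.pyGet? r 0 == some "") = false := by
          rw [hsame]; simp [hl]
        have hA : emitRun (r ++ [l]) = r ++ [l] := by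
          simp only [emitRun, hhd, hnb, Bool.false_eq_true, if_false]
        have hB : emitRun r = r := by
          simp only [emitRun, hnb, Bool.false_eq_true, if_false]
        rw [hnb, keptFrom_nonblank l ls false hl]
        simp [List.flatMap_append, hA, hB]
    · have hstep : buildStep (rs ++ [r]) l = (rs ++ [r]) ++ [[l]] := by
        simp [buildStep, hlast, hsame]
      have hhd : PySem.List.pyGet? ([l] : List String) 0 = some l := by
        simp
      rw [List.foldl_cons, hstep, ih (rs ++ [r]) [l] (by simp), hhd]
      by_cases hl : l = ""
      · subst hl
        have hprev : (PySem.List.pyGet? r 0 == some "") = false := by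
          cases hx : (PySem.List.pyGet? r 0 == some "") with
          | false => rfl
          | true => exact absurd (by rw [hx]; rfl) hsame
        have hA : emitRun [""] = [""] := rfl
        rw [hprev, keptFrom_blank_false]
        simp [List.flatMap_append, hA]
      · have hprev : (PySem.List.pyGet? r 0 == some "") = true := by
          cases hx : (PySem.List.pyGet? r 0 == some "") with
          | true => rfl
          | false => exact absurd (by rw [hx]; simp [hl]) hsame
        have hA : emitRun [l] = [l] := by
          simp only [emitRun, hhd]
          simp [hl]
        rw [hprev, keptFrom_nonblank l ls true hl,
          show ((some l : Option String) == some "") = false from by simp [hl]]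
        simp [List.flatMap_append, hA]

lemma build_emit (cl : List String) :
    ((cl.foldl buildStep []).foldl emitStep []) = keptFrom cl false := by
  rw [emit_eq_flatMap]
  cases cl with
  | nil => simp [keptFrom]
  | cons c cs =>
    have hstep : buildStep [] c = [[c]] := by simp [buildStep, PySem.List.pyGet?]
    have hhd : PySem.List.pyGet? ([c] : List String) 0 = some c := by
      simp
    rw [List.foldl_cons, hstep]
    have haux := build_emit_aux cs [] [c] (by simp)
    simp only [List.nil_append] at haux
    rw [haux, hhd]
    by_cases hc : c = ""
    · subst hc
      have hA : emitRun [""] = [""] := rfl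
      rw [keptFrom_blank_false]
      simp [hA]
    · have hA : emitRun [c] = [c] := by
        simp only [emitRun, hhd]
        simp [hc]
      rw [keptFrom_nonblank c cs false hc,
        show ((some c : Option String) == some "") = false from by simp [hc]]
      simp [hA]

-- ===== VERDICT (by name: the statement is the Claim_ definition above) =====
theorem apply_code_formatting_py_spec : Claim_equal_apply_code_formatting_py := by
  intro code _
  unfold Spec_apply_code_formatting_py apply_code_formatting_py apply_code_formatting_py_alt
  simp only [loopA_eq, build_emit, List.nil_append]
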